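-- pv_equiv track=rewrite | github.com/robandrewford/gcp-data-platform-demo | pipelines/utils/scd_type2_handler.py | group_events_by_record
-- ===== SOURCE A (Python) =====
-- from collections import defaultdict
-- from typing import Any, Optional
--
-- def group_events_by_record(
--
--     events: list[dict[str, Any]]
-- ) -> dict[str, list[dict[str, Any]]]:
--     """
--     Group events by record ID for batch processing.
--
--     Args:
--         events: List of CDC events
--
--     Returns:
--         Dictionary mapping record_id to list of events
--     """
--     grouped = defaultdict(list)
--
--     for event in events:
--         record_id = event.get('record_id')
--         if record_id:
--             grouped[record_id].append(event)
--
--     # Sort events by timestamp within each group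
--     for record_id in grouped:
--         grouped[record_id].sort(key=lambda e: e.get('event_timestamp', ''))
--
--     return dict(grouped)
-- ===== SOURCE B (Python) =====
-- def group_events_by_record(events):
--     """Group CDC events by record_id; one global stable sort replaces the per-group sorts."""
--     grouped = {}
--     # register keys in order of first truthy record_id (matches A's insertion order)
--     for event in events:
--         record_id = event.get('record_id')
--         if record_id:
--             grouped.setdefault(record_id, [])
--     # one stable global sort by timestamp, then distribute
--     for event in sorted(events, key=lambda e: e.get('event_timestamp', '')):
--         record_id = event.get('record_id')
--         if record_id:
--             grouped[record_id].append(event)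
--     return grouped
-- ===== Notes on version B (the rewrite author's own statement) =====
-- stated objective: alternative
-- what changed: Replaces defaultdict-grouping followed by a per-group sort of each bucket with a key-registration pass plus ONE global stable sort by timestamp whose elements are then distributed into their buckets in a single pass (stability makes per-bucket order identical).
import Mathlib
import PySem

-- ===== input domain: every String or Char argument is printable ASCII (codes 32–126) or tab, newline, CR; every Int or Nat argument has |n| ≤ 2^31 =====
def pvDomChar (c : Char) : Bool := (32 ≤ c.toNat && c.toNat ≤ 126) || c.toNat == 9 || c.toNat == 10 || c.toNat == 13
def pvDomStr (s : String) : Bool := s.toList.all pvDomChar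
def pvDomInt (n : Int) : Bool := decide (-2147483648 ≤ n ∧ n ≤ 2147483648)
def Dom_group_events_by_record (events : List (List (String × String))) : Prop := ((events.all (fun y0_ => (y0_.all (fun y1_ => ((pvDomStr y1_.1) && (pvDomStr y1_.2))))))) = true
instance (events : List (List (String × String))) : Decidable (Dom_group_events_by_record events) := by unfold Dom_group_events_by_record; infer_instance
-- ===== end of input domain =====

-- B replaces A's defaultdict grouping + per-group sorts by a key-registration pass,
-- ONE global stable sort by timestamp and a distribution pass ('alternative', no speed claim).

-- ===== PORT A =====
-- event.get(k): first match in the association list (the Python dict, insertion order)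
def evGet (ev : List (String × String)) (k : String) : Option String :=
  (ev.find? (fun p => p.1 == k)).map (·.2)

-- e.get('event_timestamp', '')
def tsOf (ev : List (String × String)) : String := (evGet ev "event_timestamp").getD ""

def group_events_by_record (events : List (List (String × String))) : List (String × List (List (String × String))) :=
  -- grouped = defaultdict(list); for event in events: rid = event.get('record_id'); if rid: grouped[rid].append(event)
  let grouped : PySem.Dict String (List (List (String × String))) :=
    events.foldl (fun d ev =>
      match evGet ev "record_id" with
      | none => d
      | some rid => if rid = "" then d else d.modify rid [] (· ++ [ev])) PySem.Dict.empty
  -- for rid in grouped: grouped[rid].sort(key=lambda e: e.get('event_timestamp','')); return dict(grouped)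
  grouped.items.map (fun p => (p.1, PySem.List.sorted p.2 tsOf false))

-- ===== PORT B =====
def group_events_by_record_alt (events : List (List (String × String))) : List (String × List (List (String × String))) :=
  -- grouped = {}; for event in events: rid = event.get('record_id'); if rid: grouped.setdefault(rid, [])
  let d0 : PySem.Dict String (List (List (String × String))) :=
    events.foldl (fun d ev =>
      match evGet ev "record_id" with
      | none => d
      | some rid => if rid = "" then d else d.setdefault rid []) PySem.Dict.empty
  -- for event in sorted(events, key=lambda e: e.get('event_timestamp', '')): if rid: grouped[rid].append(event)
  let d : PySem.Dict String (List (List (String × String))) :=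
    (PySem.List.sorted events tsOf false).foldl (fun d ev =>
      match evGet ev "record_id" with
      | none => d
      | some rid => if rid = "" then d else d.modify rid [] (· ++ [ev])) d0
  d.items

-- ===== PRECONDITION & SPEC =====
def Spec_group_events_by_record (events : List (List (String × String))) (out : List (String × List (List (String × String)))) : Prop := out = group_events_by_record_alt events
instance (events : List (List (String × String))) (out : List (String × List (List (String × String)))) : Decidable (Spec_group_events_by_record events out) := by unfold Spec_group_events_by_record; infer_instance

-- ===== CLAIM (what is proved, stated in full; the proofs are below) =====
def Claim_equal_group_events_by_record : Prop := ∀ (events : List (List (String × String))), Dom_group_events_by_record events → Spec_group_events_by_record events (group_events_by_record events)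

-- ===== LEMMAS AND PROOFS =====

-- truthiness of event.get('record_id') (an Optional[str]): some non-empty string
def pT (ev : List (String × String)) : Bool := ((evGet ev "record_id").getD "") != ""

def ridOf (ev : List (String × String)) : String := (evGet ev "record_id").getD ""

-- the grouping step of A (and of B's fill loop), as an if over a Bool test
theorem stepA_eq (d : PySem.Dict String (List (List (String × String)))) (ev : List (String × String)) :
    (match evGet ev "record_id" with
      | none => d
      | some rid => if rid = "" then d else d.modify rid [] (· ++ [ev]))
    = if pT ev then d.modify (ridOf ev) [] (· ++ [ev]) else d := by
  cases h : evGet ev "record_id" with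
  | none => simp [pT, h]
  | some r =>
    by_cases hr : r = "" <;> simp [pT, ridOf, h, hr]

theorem stepB0_eq (d : PySem.Dict String (List (List (String × String)))) (ev : List (String × String)) :
    (match evGet ev "record_id" with
      | none => d
      | some rid => if rid = "" then d else d.setdefault rid [])
    = if pT ev then d.setdefault (ridOf ev) [] else d := by
  cases h : evGet ev "record_id" with
  | none => simp [pT, h]
  | some r =>
    by_cases hr : r = "" <;> simp [pT, ridOf, h, hr]

-- ---- stable insertion sort commutes with filter ----

theorem insertBy_nil {α : Type} (b : α → α → Bool) (x : α) :
    PySem.List.insertBy b x [] = [x] := rfl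

theorem insertBy_cons {α : Type} (b : α → α → Bool) (x y : α) (ys : List α) :
    PySem.List.insertBy b x (y :: ys)
      = if b x y then x :: y :: ys else y :: PySem.List.insertBy b x ys := rfl

theorem insertBy_front {α : Type} (key : α → String) (x : α) (l : List α)
    (h : ∀ z ∈ l, key x < key z) :
    PySem.List.insertBy (fun a b => decide (key a < key b)) x l = x :: l := by
  cases l with
  | nil => rfl
  | cons y ys =>
    rw [insertBy_cons, if_pos (by simpa using h y (by simp))]

theorem pairwise_insertBy {α : Type} (key : α → String) (x : α) (ys : List α)
    (h : ys.Pairwise (fun a b => key a ≤ key b)) :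
    (PySem.List.insertBy (fun a b => decide (key a < key b)) x ys).Pairwise
      (fun a b => key a ≤ key b) := by
  induction ys with
  | nil => simp [insertBy_nil]
  | cons y ys ih =>
    rw [List.pairwise_cons] at h
    obtain ⟨hy, hys⟩ := h
    rw [insertBy_cons]
    by_cases hxy : key x < key y
    · rw [if_pos (by simpa using hxy)]
      refine List.Pairwise.cons ?_ (List.Pairwise.cons hy hys)
      intro b hb
      rcases List.mem_cons.mp hb with rfl | hb'
      · exact le_of_lt hxy
      · exact le_trans (le_of_lt hxy) (hy b hb')
    · rw [if_neg (by simpa using hxy)]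
      refine List.Pairwise.cons ?_ (ih hys)
      intro b hb
      rw [PySem.List.mem_insertBy] at hb
      rcases hb with rfl | hb'
      · exact le_of_not_gt hxy
      · exact hy b hb'

theorem filter_insertBy {α : Type} (key : α → String) (q : α → Bool) (x : α) (ys : List α)
    (h : ys.Pairwise (fun a b => key a ≤ key b)) :
    (PySem.List.insertBy (fun a b => decide (key a < key b)) x ys).filter q
      = if q x then PySem.List.insertBy (fun a b => decide (key a < key b)) x (ys.filter q)
        else ys.filter q := by
  induction ys with
  | nil => by_cases hq : q x <;> simp [insertBy_nil, hq]
  | cons y ys ih =>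
    rw [List.pairwise_cons] at h
    obtain ⟨hy, hys⟩ := h
    rw [insertBy_cons]
    by_cases hxy : key x < key y
    · rw [if_pos (by simpa using hxy)]
      by_cases hq : q x
      · have hfront : ∀ z ∈ (y :: ys).filter q, key x < key z := by
          intro z hz
          have hz' : z ∈ y :: ys := List.mem_of_mem_filter hz
          rcases List.mem_cons.mp hz' with rfl | hz''
          · exact hxy
          · exact lt_of_lt_of_le hxy (hy z hz'')
        rw [if_pos hq, insertBy_front key x _ hfront, List.filter_cons_of_pos hq]
      · rw [if_neg (by simpa using hq), List.filter_cons_of_neg (by simpa using hq)]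
    · rw [if_neg (by simpa using hxy)]
      by_cases hqy : q y
      · rw [List.filter_cons_of_pos hqy, List.filter_cons_of_pos hqy, ih hys]
        by_cases hq : q x
        · rw [if_pos hq, if_pos hq, insertBy_cons, if_neg (by simpa using hxy)]
        · rw [if_neg (by simpa using hq), if_neg (by simpa using hq)]
      · rw [List.filter_cons_of_neg (by simpa using hqy),
            List.filter_cons_of_neg (by simpa using hqy), ih hys]

theorem foldl_insertBy_filter {α : Type} (key : α → String) (q : α → Bool) :
    ∀ (l acc : List α), acc.Pairwise (fun a b => key a ≤ key b) →
      (l.foldl (fun acc x => PySem.List.insertBy (fun a b => decide (key a < key b)) x acc) acc).filter q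
        = (l.filter q).foldl (fun acc x => PySem.List.insertBy (fun a b => decide (key a < key b)) x acc)
            (acc.filter q) := by
  intro l
  induction l with
  | nil => intro acc _; simp
  | cons x l ih =>
    intro acc hacc
    have hacc' := pairwise_insertBy key x acc hacc
    rw [List.foldl_cons, ih _ hacc', filter_insertBy key q x acc hacc]
    by_cases hq : q x <;> simp [hq]

theorem filter_sorted {α : Type} (key : α → String) (q : α → Bool) (xs : List α) :
    (PySem.List.sorted xs key false).filter q = PySem.List.sorted (xs.filter q) key false := by
  rw [show PySem.List.sorted xs key false = PySem.List.sorted xs key from rfl,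
      show PySem.List.sorted (xs.filter q) key false = PySem.List.sorted (xs.filter q) key from rfl,
      PySem.List.sorted_eq_foldl_insertBy, PySem.List.sorted_eq_foldl_insertBy]
  simpa using foldl_insertBy_filter key q xs [] (by simp)

-- ---- the grouping folds ----

theorem getD_groupFold (l : List (List (String × String)))
    (d : PySem.Dict String (List (List (String × String)))) (k : String) :
    (l.foldl (fun d ev => d.modify (ridOf ev) [] (· ++ [ev])) d).getD k []
      = d.getD k [] ++ l.filter (fun ev => ridOf ev == k) := by
  have h := PySem.Dict.getD_foldl_modify_append (l.map (fun ev => (ridOf ev, ev))) d k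
  rw [List.foldl_map] at h
  simpa [List.filter_map, Function.comp_def, List.map_map] using h

theorem getD_regFold (l : List (List (String × String))) :
    ∀ (d : PySem.Dict String (List (List (String × String)))) (k : String),
      (l.foldl (fun d ev => d.setdefault (ridOf ev) []) d).getD k [] = d.getD k [] := by
  induction l with
  | nil => intro d k; simp
  | cons ev l ih =>
    intro d k
    rw [List.foldl_cons, ih]
    by_cases hc : d.contains (ridOf ev) = true
    · rw [PySem.Dict.setdefault_of_contains d [] hc]
    · rw [PySem.Dict.setdefault_of_not_contains d [] (by simpa using hc),
          PySem.Dict.getD_insert]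
      split_ifs with hk
      · subst hk; exact (PySem.Dict.getD_of_not_contains d [] (by simpa using hc)).symm
      · rfl

theorem contains_regFold_mono (l : List (List (String × String))) :
    ∀ (d : PySem.Dict String (List (List (String × String)))) (k : String),
      d.contains k = true → (l.foldl (fun d ev => d.setdefault (ridOf ev) []) d).contains k = true := by
  induction l with
  | nil => intro d k h; simpa using h
  | cons ev l ih =>
    intro d k h
    rw [List.foldl_cons]
    exact ih _ k (by rw [PySem.Dict.contains_setdefault]; simp [h])

theorem contains_regFold_of_mem (l : List (List (String × String))) :
    ∀ (d : PySem.Dict String (List (List (String × String)))) (ev : List (String × String)),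
      ev ∈ l → (l.foldl (fun d ev => d.setdefault (ridOf ev) []) d).contains (ridOf ev) = true := by
  induction l with
  | nil => intro d ev h; simp at h
  | cons x l ih =>
    intro d ev h
    rw [List.foldl_cons]
    rcases List.mem_cons.mp h with rfl | h'
    · exact contains_regFold_mono l _ _ (by rw [PySem.Dict.contains_setdefault]; simp)
    · exact ih _ ev h'

theorem keys_group_reg (l : List (List (String × String))) :
    ∀ (d d' : PySem.Dict String (List (List (String × String)))), d.keys = d'.keys →
      (l.foldl (fun d ev => d.modify (ridOf ev) [] (· ++ [ev])) d).keys
        = (l.foldl (fun d ev => d.setdefault (ridOf ev) []) d').keys := by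
  induction l with
  | nil => intro d d' h; simpa using h
  | cons ev l ih =>
    intro d d' h
    rw [List.foldl_cons, List.foldl_cons]
    apply ih
    have hc : d.contains (ridOf ev) = d'.contains (ridOf ev) := by
      rw [PySem.Dict.contains_eq_decide_mem_keys, PySem.Dict.contains_eq_decide_mem_keys, h]
    rw [PySem.Dict.keys_modify, PySem.Dict.keys_setdefault]
    by_cases hcc : d.contains (ridOf ev) = true
    · rw [PySem.Dict.keys_insert_of_contains _ _ hcc, if_pos (hc ▸ hcc), h]
    · rw [PySem.Dict.keys_insert_of_not_contains _ _ (by simpa using hcc),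
          if_neg (by rw [← hc]; simpa using hcc), h]

theorem keys_fillFold (l : List (List (String × String))) :
    ∀ (d : PySem.Dict String (List (List (String × String)))),
      (∀ ev ∈ l, d.contains (ridOf ev) = true) →
      (l.foldl (fun d ev => d.modify (ridOf ev) [] (· ++ [ev])) d).keys = d.keys := by
  induction l with
  | nil => intro d _; simp
  | cons ev l ih =>
    intro d h
    rw [List.foldl_cons, ih]
    · rw [PySem.Dict.keys_modify,
          PySem.Dict.keys_insert_of_contains _ _ (h ev (by simp))]
    · intro ev' h'
      rw [PySem.Dict.contains_modify]
      simp [h ev' (List.mem_cons_of_mem _ h')]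

theorem ports_eq (events : List (List (String × String))) :
    group_events_by_record events = group_events_by_record_alt events := by
  unfold group_events_by_record group_events_by_record_alt
  simp only [stepA_eq, stepB0_eq]
  rw [PySem.List.foldl_if_eq_foldl_filter, PySem.List.foldl_if_eq_foldl_filter,
      PySem.List.foldl_if_eq_foldl_filter]
  set lA := events.filter pT with hlA
  set lB := (PySem.List.sorted events tsOf false).filter pT with hlB
  set gA := lA.foldl (fun d ev => d.modify (ridOf ev) [] (· ++ [ev])) PySem.Dict.empty with hgA
  set r0 := lA.foldl (fun d ev => d.setdefault (ridOf ev) []) PySem.Dict.empty with hr0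
  set dB := lB.foldl (fun d ev => d.modify (ridOf ev) [] (· ++ [ev])) r0 with hdB
  have hkeysAR : gA.keys = r0.keys := keys_group_reg lA _ _ rfl
  have hcontained : ∀ ev ∈ lB, r0.contains (ridOf ev) = true := by
    intro ev hev
    have h1 : ev ∈ PySem.List.sorted events tsOf false ∧ pT ev = true := by
      constructor
      · exact List.mem_of_mem_filter hev
      · exact List.of_mem_filter hev
    have h2 : ev ∈ events := (PySem.List.mem_sorted _ _ _ _).mp h1.1
    exact contains_regFold_of_mem lA _ ev (List.mem_filter.mpr ⟨h2, h1.2⟩)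
  have hkeysB : dB.keys = r0.keys := keys_fillFold lB r0 hcontained
  have hnodA : gA.keys.Nodup :=
    PySem.Dict.nodup_keys_foldl_modify_key lA ridOf [] (fun _ ev => (· ++ [ev])) _
      PySem.Dict.nodup_keys_empty
  have hnodB : dB.keys.Nodup := by rw [hkeysB, ← hkeysAR]; exact hnodA
  rw [PySem.Dict.items_eq_map_keys gA hnodA [], PySem.Dict.items_eq_map_keys dB hnodB [],
      List.map_map, hkeysB, ← hkeysAR]
  apply List.map_congr_left
  intro k _
  simp only [Function.comp_apply]
  congr 1
  rw [hgA, hdB, hr0]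
  simp only [getD_groupFold, getD_regFold, PySem.Dict.getD_empty, List.nil_append]
  rw [show lB = List.filter pT (PySem.List.sorted events tsOf false) from hlB,
      List.filter_filter, filter_sorted, filter_sorted, List.filter_filter]

-- ===== VERDICT (by name: the statement is the Claim_ definition above) =====
theorem group_events_by_record_spec : Claim_equal_group_events_by_record := by
  intro events _
  unfold Spec_group_events_by_record
  exact ports_eq events
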